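-- pv_equiv track=rewrite | github.com/zhiyu-zhao-ucas/verl_meta_token | verl/experimental/vla/sac/replay_pool.py | _allocate_counts_across_tasks
-- ===== SOURCE A (Python) =====
-- def _allocate_counts_across_tasks(task_sizes: dict[str, int], total_count: int) -> dict[str, int]:
--     total_available = sum(task_sizes.values())
--     if total_count > total_available:
--         raise ValueError(f"Requested {total_count} samples but only {total_available} available across task pools.")
--
--     allocation: dict[str, int] = {task_id: 0 for task_id in task_sizes}
--     task_order = list(task_sizes.keys())
--
--     remaining = total_count
--     while remaining > 0:
--         progressed = False
--         for task_id in task_order: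
--             if allocation[task_id] < task_sizes[task_id]:
--                 allocation[task_id] += 1
--                 remaining -= 1
--                 progressed = True
--                 if remaining == 0:
--                     break
--
--         if not progressed:
--             raise RuntimeError("No eligible task pool left while allocation is still remaining.")
--
--     return allocation
-- ===== SOURCE B (Python) =====
-- def _allocate_counts_across_tasks(task_sizes: dict[str, int], total_count: int) -> dict[str, int]:
--     total_available = sum(task_sizes.values())
--     if total_count > total_available:
--         raise ValueError(f"Requested {total_count} samples but only {total_available} available across task pools.")
--
--     caps = {task_id: max(size, 0) for task_id, size in task_sizes.items()}
--     if total_count <= 0: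
--         return {task_id: 0 for task_id in task_sizes}
--
--     # Water-filling: find the common fill level reached by full round-robin
--     # rounds, via the sorted capacities, then hand out the remainder in task order.
--     sorted_caps = sorted(caps.values())
--     n = len(sorted_caps)
--     level = 0
--     remaining = total_count
--     for i, c in enumerate(sorted_caps):
--         pools = n - i  # pools whose capacity is >= c
--         if remaining >= (c - level) * pools:
--             remaining -= (c - level) * pools
--             level = c
--         else:
--             extra = remaining // pools
--             level += extra
--             remaining -= extra * pools
--             break
--
--     allocation: dict[str, int] = {}
--     for task_id, cap in caps.items():
--         count = min(cap, level)
--         if remaining > 0 and cap > level: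
--             count += 1
--             remaining -= 1
--         allocation[task_id] = count
--     return allocation
-- ===== Notes on version B (the rewrite author's own statement) =====
-- stated objective: alternative
-- what changed: A hands out one sample at a time in repeated round-robin passes over the tasks; B computes the common fill level reached by the full rounds in closed form from the sorted capacities (water-filling) and then hands out the remainder in one pass over the tasks in order.
import Mathlib
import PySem

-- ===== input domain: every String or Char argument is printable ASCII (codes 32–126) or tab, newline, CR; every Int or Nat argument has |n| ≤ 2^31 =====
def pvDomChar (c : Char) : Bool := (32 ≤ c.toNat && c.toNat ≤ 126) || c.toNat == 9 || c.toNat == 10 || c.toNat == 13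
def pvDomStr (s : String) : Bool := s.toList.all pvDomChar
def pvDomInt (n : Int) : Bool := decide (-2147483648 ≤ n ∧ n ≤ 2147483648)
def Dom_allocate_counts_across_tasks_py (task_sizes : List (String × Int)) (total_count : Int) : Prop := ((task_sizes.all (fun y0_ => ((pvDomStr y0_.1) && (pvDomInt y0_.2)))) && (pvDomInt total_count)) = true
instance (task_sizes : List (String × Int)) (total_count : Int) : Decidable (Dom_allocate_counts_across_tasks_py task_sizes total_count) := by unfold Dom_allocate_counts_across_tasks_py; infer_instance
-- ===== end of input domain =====

-- B replaces A's one-sample-at-a-time round-robin passes by closed-form water-filling over the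
-- sorted capacities plus a single remainder pass (objective: alternative algorithm).

-- ===== PORT A =====
-- the inner `for task_id in task_order:` loop; alloc[task_id] / task_sizes[task_id] are read with
-- getD 0 — both keys are always present on the calls the port makes, so the default is never consulted
def aPass (sizes : PySem.Dict String Int) : List String → PySem.Dict String Int → Int → Bool →
    PySem.Dict String Int × Int × Bool
  | [], alloc, remaining, progressed => (alloc, remaining, progressed)
  | t :: rest, alloc, remaining, progressed =>
    if alloc.getD t 0 < sizes.getD t 0 then
      if remaining - 1 = 0 then (alloc.modify t 0 (· + 1), remaining - 1, true)
      else aPass sizes rest (alloc.modify t 0 (· + 1)) (remaining - 1) true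
    else aPass sizes rest alloc remaining progressed

-- termination helper for the `while` loop: a pass either leaves (remaining, progressed) unchanged
-- or strictly decreases remaining towards 0 and reports progressed = true
lemma aPass_progress (sizes : PySem.Dict String Int) :
    ∀ (ks : List String) (alloc : PySem.Dict String Int) (rem : Int) (prog : Bool),
      0 < rem →
      ((aPass sizes ks alloc rem prog).2.1 = rem ∧ (aPass sizes ks alloc rem prog).2.2 = prog) ∨
      (0 ≤ (aPass sizes ks alloc rem prog).2.1 ∧ (aPass sizes ks alloc rem prog).2.1 < rem ∧
        (aPass sizes ks alloc rem prog).2.2 = true) := by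
  intro ks
  induction ks with
  | nil => intro alloc rem prog h; simp [aPass]
  | cons t rest ih =>
    intro alloc rem prog h
    by_cases he : alloc.getD t 0 < sizes.getD t 0
    · by_cases hz : rem - 1 = 0
      · right; simp [aPass, he, hz]; omega
      · have := ih (alloc.modify t 0 (· + 1)) (rem - 1) true (by omega)
        simp only [aPass, if_pos he, if_neg hz]
        rcases this with ⟨h1, h2⟩ | ⟨h1, h2, h3⟩
        · right; exact ⟨by omega, by omega, h2⟩
        · right; exact ⟨h1, by omega, h3⟩
    · have := ih alloc rem prog h
      simpa [aPass, he] using this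

-- the `while remaining > 0:` loop; the `raise RuntimeError` branch (progressed = False)
-- is unreachable inside Pre_, the port returns the current allocation there
def aLoop (sizes : PySem.Dict String Int) (order : List String)
    (alloc : PySem.Dict String Int) (remaining : Int) : PySem.Dict String Int :=
  if h : 0 < remaining then
    let r := aPass sizes order alloc remaining false
    if hp : r.2.2 = true then aLoop sizes order r.1 r.2.1
    else r.1
  else alloc
termination_by remaining.toNat
decreasing_by
  rcases aPass_progress sizes order alloc remaining false h with ⟨h1, h2⟩ | ⟨h1, h2, _⟩
  · rw [hp] at h2; cases h2
  · omega

def allocate_counts_across_tasks_py (task_sizes : List (String × Int)) (total_count : Int) :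
    List (String × Int) :=
  let sizes : PySem.Dict String Int := ⟨task_sizes⟩
  let total_available := sizes.values.sum
  if total_available < total_count then []  -- raise ValueError; outside Pre_
  else
    let allocation := sizes.keys.foldl (fun d t => d.insert t (0 : Int)) PySem.Dict.empty
    let task_order := sizes.keys
    (aLoop sizes task_order allocation total_count).items

-- ===== PORT B =====
-- the water-filling loop `for i, c in enumerate(sorted_caps): ...` of Source B
def bFill (n : Int) : List (Int × Int) → Int → Int → Int × Int
  | [], level, remaining => (level, remaining)
  | (i, c) :: rest, level, remaining =>
    let pools := n - i
    if (c - level) * pools ≤ remaining then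
      bFill n rest c (remaining - (c - level) * pools)
    else
      let extra := PySem.Int.floordiv remaining pools
      (level + extra, remaining - extra * pools)

-- the final `for task_id, cap in caps.items(): ...` loop of Source B
def bAlloc : List (String × Int) → Int → Int → PySem.Dict String Int → PySem.Dict String Int
  | [], _, _, allocation => allocation
  | (t, cap) :: rest, level, remaining, allocation =>
    let count := min cap level
    if 0 < remaining ∧ level < cap then
      bAlloc rest level (remaining - 1) (allocation.insert t (count + 1))
    else bAlloc rest level remaining (allocation.insert t count)

def allocate_counts_across_tasks_py_alt (task_sizes : List (String × Int)) (total_count : Int) :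
    List (String × Int) :=
  let sizes : PySem.Dict String Int := ⟨task_sizes⟩
  let total_available := sizes.values.sum
  if total_available < total_count then []  -- raise ValueError; outside Pre_
  else
    let caps := sizes.items.foldl (fun d p => d.insert p.1 (max p.2 0)) PySem.Dict.empty
    if total_count ≤ 0 then
      (sizes.keys.foldl (fun d t => d.insert t (0 : Int)) PySem.Dict.empty).items
    else
      let sorted_caps := PySem.List.sorted caps.values (fun x => x)
      let n : Int := (sorted_caps.length : Int)
      let lr := bFill n (PySem.List.enumerate sorted_caps) 0 total_count
      (bAlloc caps.items lr.1 lr.2 PySem.Dict.empty).items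

-- ===== PRECONDITION & SPEC =====
-- Pre_ excludes association lists with duplicate keys (they cannot represent A's dict argument)
-- and requests exceeding the available total, on which A raises ValueError.
def Pre_allocate_counts_across_tasks_py (task_sizes : List (String × Int)) (total_count : Int) : Prop :=
  (task_sizes.map Prod.fst).Nodup ∧ total_count ≤ (task_sizes.map Prod.snd).sum
instance (task_sizes : List (String × Int)) (total_count : Int) : Decidable (Pre_allocate_counts_across_tasks_py task_sizes total_count) := by unfold Pre_allocate_counts_across_tasks_py; infer_instance

def pvWitness_allocate_counts_across_tasks_py : (List (String × Int)) × Int := ([("a", 2), ("b", 1)], 2)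

def Spec_allocate_counts_across_tasks_py (task_sizes : List (String × Int)) (total_count : Int) (out : List (String × Int)) : Prop := out = allocate_counts_across_tasks_py_alt task_sizes total_count
instance (task_sizes : List (String × Int)) (total_count : Int) (out : List (String × Int)) : Decidable (Spec_allocate_counts_across_tasks_py task_sizes total_count out) := by unfold Spec_allocate_counts_across_tasks_py; infer_instance

-- ===== CLAIM (what is proved, stated in full; the proofs are below) =====
def Claim_equal_allocate_counts_across_tasks_py : Prop := ∀ (task_sizes : List (String × Int)) (total_count : Int), Dom_allocate_counts_across_tasks_py task_sizes total_count → Pre_allocate_counts_across_tasks_py task_sizes total_count → Spec_allocate_counts_across_tasks_py task_sizes total_count (allocate_counts_across_tasks_py task_sizes total_count)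

-- ===== LEMMAS AND PROOFS =====

-- abbreviations used only by the proofs
def pvSz (ts : List (String × Int)) (k : String) : Int := PySem.Dict.getD ⟨ts⟩ k 0
def pvMap (ts : List (String × Int)) (f : String → Int) : List (String × Int) :=
  ts.map (fun p => (p.1, f p.1))
def pvCaps (ts : List (String × Int)) : List (String × Int) := ts.map (fun p => (p.1, max p.2 0))
def pvCs (ts : List (String × Int)) : List Int := ts.map (fun p => max p.2 0)
def pvS (cs : List Int) (L : Int) : Int := (cs.map (fun c => min c L)).sum
def pvE (cs : List Int) (L : Int) : Int := (cs.countP (fun c => decide (L < c)) : Int)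
def pvMinprof (ts : List (String × Int)) (L : Int) : String → Int :=
  fun k => min (max (pvSz ts k) 0) L
def pvBump (sz f : String → Int) (ks : List String) : String → Int :=
  fun x => if x ∈ ks ∧ f x < sz x then f x + 1 else f x
def pvGood (cs : List Int) (L rem : Int) : Prop :=
  0 ≤ L ∧ 0 ≤ rem ∧ (rem < pvE cs L ∨ (rem = 0 ∧ pvE cs L = 0))

-- the "remainder pass" distribution, over keys with a current profile f …
def pvDistF (sz f : String → Int) : List String → Int → List (String × Int)
  | [], _ => []
  | t :: rest, rem =>
    if 0 < rem ∧ f t < sz t then (t, f t + 1) :: pvDistF sz f rest (rem - 1)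
    else (t, f t) :: pvDistF sz f rest rem

-- … and over (key, capacity) pairs with a level L (what bAlloc produces)
def pvDistC (L : Int) : List (String × Int) → Int → List (String × Int)
  | [], _ => []
  | (t, c) :: rest, rem =>
    if 0 < rem ∧ L < c then (t, min c L + 1) :: pvDistC L rest (rem - 1)
    else (t, min c L) :: pvDistC L rest rem

lemma getD_pvMap (ts : List (String × Int)) (f : String → Int) (k : String)
    (hk : k ∈ ts.map Prod.fst) :
    PySem.Dict.getD (⟨pvMap ts f⟩ : PySem.Dict String Int) k 0 = f k := by
  induction ts with
  | nil => simp at hk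
  | cons p rest ih =>
    rw [show pvMap (p :: rest) f = (p.1, f p.1) :: pvMap rest f from rfl,
      PySem.Dict.getD_eq_get?_getD, PySem.Dict.get?_mk_cons]
    by_cases hpk : p.1 = k
    · simp [hpk]
    · have hk' : k ∈ rest.map Prod.fst := by
        rw [List.map_cons] at hk
        rcases List.mem_cons.mp hk with h | h
        · exact absurd h.symm hpk
        · exact h
      have := ih hk'
      rw [PySem.Dict.getD_eq_get?_getD] at this
      simpa [hpk] using this

lemma keys_pvMap (ts : List (String × Int)) (f : String → Int) :
    (⟨pvMap ts f⟩ : PySem.Dict String Int).keys = ts.map Prod.fst := by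
  simp [PySem.Dict.keys, pvMap, List.map_map, Function.comp]

lemma contains_pvMap (ts : List (String × Int)) (f : String → Int) (k : String)
    (hk : k ∈ ts.map Prod.fst) :
    (⟨pvMap ts f⟩ : PySem.Dict String Int).contains k = true := by
  rw [PySem.Dict.contains_iff_mem_keys, keys_pvMap]; exact hk

lemma modify_pvMap (ts : List (String × Int)) (f : String → Int) (k : String)
    (hk : k ∈ ts.map Prod.fst) (g : Int → Int) :
    (⟨pvMap ts f⟩ : PySem.Dict String Int).modify k 0 g =
      (⟨pvMap ts (fun x => if x = k then g (f k) else f x)⟩ : PySem.Dict String Int) := by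
  apply PySem.Dict.ext
  show ((⟨pvMap ts f⟩ : PySem.Dict String Int).insert k
      (g ((⟨pvMap ts f⟩ : PySem.Dict String Int).getD k 0))).items = _
  rw [getD_pvMap ts f k hk]
  rw [PySem.Dict.items_insert_of_contains _ _ (contains_pvMap ts f k hk)]
  show (ts.map (fun p => (p.1, f p.1))).map _ = ts.map _
  rw [List.map_map]
  apply List.map_congr_left
  intro p _
  by_cases hpk : p.1 = k
  · simp [Function.comp, hpk]
  · simp [Function.comp, hpk]

lemma pvMap_congr (ts : List (String × Int)) (f f' : String → Int)
    (h : ∀ p ∈ ts, f p.1 = f' p.1) : pvMap ts f = pvMap ts f' := by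
  apply List.map_congr_left
  intro p hp; rw [h p hp]

lemma sz_eq (ts : List (String × Int)) (hnd : (ts.map Prod.fst).Nodup) :
    ∀ p ∈ ts, pvSz ts p.1 = p.2 := by
  intro p hp
  have : ((⟨ts⟩ : PySem.Dict String Int)).keys.Nodup := by
    simpa [PySem.Dict.keys] using hnd
  exact PySem.Dict.getD_of_mem_items (⟨ts⟩ : PySem.Dict String Int) (k := p.1) (v := p.2)
    (by simpa using hp) this 0

lemma countP_congr_fun {α : Type} (l : List α) (p q : α → Bool)
    (h : ∀ a ∈ l, p a = q a) : l.countP p = l.countP q := by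
  induction l with
  | nil => rfl
  | cons a rest ih =>
    rw [List.countP_cons, List.countP_cons, h a (by simp), ih (fun a ha => h a (by simp [ha]))]

-- full pass: when at least countP-many samples remain, every eligible task gets one
lemma aPass_full (ts : List (String × Int)) :
    ∀ (ks : List String) (f : String → Int) (rem : Int) (prog : Bool),
      (∀ k ∈ ks, k ∈ ts.map Prod.fst) → ks.Nodup → 0 < rem →
      ((ks.countP (fun t => decide (f t < pvSz ts t)) : Int)) ≤ rem →
      aPass ⟨ts⟩ ks ⟨pvMap ts f⟩ rem prog =
        (⟨pvMap ts (pvBump (pvSz ts) f ks)⟩,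
          rem - (ks.countP (fun t => decide (f t < pvSz ts t)) : Int),
          prog || decide (0 < (ks.countP (fun t => decide (f t < pvSz ts t)) : Int))) := by
  intro ks
  induction ks with
  | nil =>
    intro f rem prog _ _ _ _
    rw [pvMap_congr ts f (pvBump (pvSz ts) f []) (by intro p _; simp [pvBump])]
    simp [aPass]
  | cons k rest ih =>
    intro f rem prog hsub hnd hr hcnt
    have hkmem : k ∈ ts.map Prod.fst := hsub k (by simp)
    have hknotin : k ∉ rest := by simp at hnd; exact hnd.1
    rw [List.countP_cons] at hcnt ⊢
    by_cases he : f k < pvSz ts k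
    · have hszeq : (⟨ts⟩ : PySem.Dict String Int).getD k 0 = pvSz ts k := rfl
      have hget : (⟨pvMap ts f⟩ : PySem.Dict String Int).getD k 0 = f k := getD_pvMap ts f k hkmem
      rw [show (rest.countP (fun t => decide (f t < pvSz ts t)) +
          if (decide (f k < pvSz ts k)) = true then 1 else 0) =
          rest.countP (fun t => decide (f t < pvSz ts t)) + 1 by simp [he]] at hcnt ⊢
      have hcnt' : rest.countP (fun t => decide (f t < pvSz ts t)) + 1 ≤ rem := by
        exact_mod_cast hcnt
      by_cases hz : rem - 1 = 0
      · -- rem = 1, so no eligible task remains in `rest`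
        have hrest0 : rest.countP (fun t => decide (f t < pvSz ts t)) = 0 := by omega
        have hall : ∀ t ∈ rest, ¬ (f t < pvSz ts t) := by
          intro t ht
          have := List.countP_eq_zero.mp hrest0 t ht
          simpa using this
        simp only [aPass, hget, hszeq, if_pos he, if_pos hz]
        rw [modify_pvMap ts f k hkmem]
        refine Prod.ext ?_ (Prod.ext ?_ ?_)
        · show (⟨pvMap ts _⟩ : PySem.Dict String Int) = ⟨pvMap ts _⟩
          congr 1
          apply pvMap_congr
          intro p _
          by_cases hpk : p.1 = k
          · simp [pvBump, hpk, he]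
          · by_cases hmem : p.1 ∈ rest
            · simp [pvBump, hpk, hmem, hall p.1 hmem]
            · simp [pvBump, hpk, hmem]
        · show rem - 1 = rem - _
          rw [hrest0]
          push_cast
          omega
        · show true = _
          simp
      · have hr' : 0 < rem - 1 := by omega
        simp only [aPass, hget, hszeq, if_pos he, if_neg hz]
        rw [modify_pvMap ts f k hkmem]
        set f' := fun x => if x = k then f k + 1 else f x with hf'
        have hcc : rest.countP (fun t => decide (f' t < pvSz ts t)) =
            rest.countP (fun t => decide (f t < pvSz ts t)) := by
          apply countP_congr_fun
          intro t ht
          have : t ≠ k := fun h => hknotin (h ▸ ht)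
          simp [hf', this]
        have := ih f' (rem - 1) true (fun t ht => hsub t (by simp [ht]))
          (by simp at hnd; exact hnd.2) hr' (by rw [hcc]; omega)
        rw [this]
        refine Prod.ext ?_ (Prod.ext ?_ ?_)
        · show (⟨pvMap ts _⟩ : PySem.Dict String Int) = ⟨pvMap ts _⟩
          congr 1
          apply pvMap_congr
          intro p _
          by_cases hpk : p.1 = k
          · rw [hpk]
            show (if k ∈ rest ∧ f' k < pvSz ts k then f' k + 1 else f' k)
              = (if k ∈ k :: rest ∧ f k < pvSz ts k then f k + 1 else f k)
            rw [if_neg (fun hh => hknotin hh.1), if_pos ⟨by simp, he⟩]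
            simp [hf']
          · have hfp : f' p.1 = f p.1 := by simp [hf', hpk]
            show (if p.1 ∈ rest ∧ f' p.1 < pvSz ts p.1 then f' p.1 + 1 else f' p.1)
              = (if p.1 ∈ k :: rest ∧ f p.1 < pvSz ts p.1 then f p.1 + 1 else f p.1)
            rw [hfp]
            by_cases hmem : p.1 ∈ rest
            · by_cases helig : f p.1 < pvSz ts p.1
              · rw [if_pos ⟨hmem, helig⟩, if_pos ⟨by simp [hmem], helig⟩]
              · rw [if_neg (fun hh => helig hh.2), if_neg (fun hh => helig hh.2)]
            · have hnm : p.1 ∉ k :: rest := by simp [hpk, hmem]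
              rw [if_neg (fun hh => hmem hh.1), if_neg (fun hh => hnm hh.1)]
        · rw [hcc]
          push_cast
          omega
        · rw [hcc]
          have hd2 : decide ((0:Int) < ((rest.countP (fun t => decide (f t < pvSz ts t))
              + 1 : Nat) : Int)) = true := by
            simp
          rw [hd2]
          simp
    · have hszeq : (⟨ts⟩ : PySem.Dict String Int).getD k 0 = pvSz ts k := rfl
      rw [show (rest.countP (fun t => decide (f t < pvSz ts t)) +
          if (decide (f k < pvSz ts k)) = true then 1 else 0) =
          rest.countP (fun t => decide (f t < pvSz ts t)) + 0 by simp [he]] at hcnt ⊢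
      simp only [aPass, getD_pvMap ts f k hkmem, hszeq, if_neg he]
      have := ih f rem prog (fun t ht => hsub t (by simp [ht]))
        (by simp at hnd; exact hnd.2) hr (by exact_mod_cast hcnt)
      rw [this]
      refine Prod.ext ?_ (Prod.ext ?_ ?_)
      · show (⟨pvMap ts _⟩ : PySem.Dict String Int) = ⟨pvMap ts _⟩
        congr 1
        apply pvMap_congr
        intro p _
        show (if p.1 ∈ rest ∧ f p.1 < pvSz ts p.1 then f p.1 + 1 else f p.1)
          = (if p.1 ∈ k :: rest ∧ f p.1 < pvSz ts p.1 then f p.1 + 1 else f p.1)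
        by_cases hpk : p.1 = k
        · rw [if_neg (fun hh => (hpk ▸ he) hh.2), if_neg (fun hh => (hpk ▸ he) hh.2)]
        · by_cases hmem : p.1 ∈ rest
          · by_cases helig : f p.1 < pvSz ts p.1
            · rw [if_pos ⟨hmem, helig⟩, if_pos ⟨by simp [hmem], helig⟩]
            · rw [if_neg (fun hh => helig hh.2), if_neg (fun hh => helig hh.2)]
          · have hnm : p.1 ∉ k :: rest := by simp [hpk, hmem]
            rw [if_neg (fun hh => hmem hh.1), if_neg (fun hh => hnm hh.1)]
      · push_cast
        omega
      · simp

lemma pvDistF_nonpos (sz f : String → Int) :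
    ∀ (ks : List String) (rem : Int), rem ≤ 0 →
      pvDistF sz f ks rem = ks.map (fun t => (t, f t)) := by
  intro ks
  induction ks with
  | nil => intro rem _; rfl
  | cons t rest ih =>
    intro rem h
    rw [pvDistF, if_neg (by omega), ih rem h]
    rfl

lemma pvDistF_congr (sz : String → Int) (f f' : String → Int) :
    ∀ (ks : List String) (rem : Int), (∀ t ∈ ks, f t = f' t) →
      pvDistF sz f ks rem = pvDistF sz f' ks rem := by
  intro ks
  induction ks with
  | nil => intro rem _; rfl
  | cons t rest ih =>
    intro rem h
    have ht := h t (by simp)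
    rw [pvDistF, pvDistF, ht, ih rem (fun a ha => h a (by simp [ha])),
      ih (rem - 1) (fun a ha => h a (by simp [ha]))]

-- partial pass: fewer samples remain than eligible tasks; they go to the first eligible tasks
lemma aPass_partial (ts : List (String × Int)) :
    ∀ (ks : List String) (f : String → Int) (rem : Int) (prog : Bool),
      (∀ k ∈ ks, k ∈ ts.map Prod.fst) → ks.Nodup → 0 < rem →
      rem < ((ks.countP (fun t => decide (f t < pvSz ts t)) : Int)) →
      ∃ f', aPass ⟨ts⟩ ks ⟨pvMap ts f⟩ rem prog = (⟨pvMap ts f'⟩, 0, true) ∧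
        (∀ x, x ∉ ks → f' x = f x) ∧
        ks.map (fun t => (t, f' t)) = pvDistF (pvSz ts) f ks rem := by
  intro ks
  induction ks with
  | nil => intro f rem prog _ _ hr hc; simp at hc; omega
  | cons k rest ih =>
    intro f rem prog hsub hnd hr hc
    have hkmem : k ∈ ts.map Prod.fst := hsub k (by simp)
    have hknotin : k ∉ rest := by simp at hnd; exact hnd.1
    rw [List.countP_cons] at hc
    by_cases he : f k < pvSz ts k
    · have hszeq : (⟨ts⟩ : PySem.Dict String Int).getD k 0 = pvSz ts k := rfl
      rw [show (rest.countP (fun t => decide (f t < pvSz ts t)) +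
          if (decide (f k < pvSz ts k)) = true then 1 else 0) =
          rest.countP (fun t => decide (f t < pvSz ts t)) + 1 by simp [he]] at hc
      have hget : (⟨pvMap ts f⟩ : PySem.Dict String Int).getD k 0 = f k := getD_pvMap ts f k hkmem
      by_cases hz : rem - 1 = 0
      · refine ⟨fun x => if x = k then f k + 1 else f x, ?_, ?_, ?_⟩
        · simp only [aPass, hget, hszeq, if_pos he, if_pos hz]
          rw [modify_pvMap ts f k hkmem]
          exact Prod.ext rfl (Prod.ext (by omega) rfl)
        · intro x hx
          have : x ≠ k := fun h => hx (by simp [h])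
          simp [this]
        · rw [pvDistF, if_pos ⟨hr, he⟩, pvDistF_nonpos _ _ _ _ (by omega)]
          simp only [List.map_cons, if_pos rfl]
          congr 1
          apply List.map_congr_left
          intro t ht
          have : t ≠ k := fun h => hknotin (h ▸ ht)
          simp [this]
      · set f1 := fun x => if x = k then f k + 1 else f x with hf1
        have hcc : rest.countP (fun t => decide (f1 t < pvSz ts t)) =
            rest.countP (fun t => decide (f t < pvSz ts t)) := by
          apply countP_congr_fun
          intro t ht
          have : t ≠ k := fun h => hknotin (h ▸ ht)
          simp [hf1, this]
        obtain ⟨f', heq, hout, hmap⟩ := ih f1 (rem - 1) true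
          (fun t ht => hsub t (by simp [ht])) (by simp at hnd; exact hnd.2)
          (by omega) (by rw [hcc]; push_cast at hc ⊢; omega)
        refine ⟨f', ?_, ?_, ?_⟩
        · simp only [aPass, hget, hszeq, if_pos he, if_neg hz]
          rw [modify_pvMap ts f k hkmem]
          exact heq
        · intro x hx
          have hxk : x ≠ k := fun h => hx (by simp [h])
          have hxr : x ∉ rest := fun h => hx (by simp [h])
          rw [hout x hxr]; simp [hf1, hxk]
        · rw [pvDistF, if_pos ⟨hr, he⟩]
          simp only [List.map_cons]
          have hfk : f' k = f k + 1 := by rw [hout k hknotin]; simp [hf1]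
          rw [hfk, hmap, pvDistF_congr (pvSz ts) f1 f rest (rem - 1)
            (fun t ht => by
              have : t ≠ k := fun h => hknotin (h ▸ ht)
              simp [hf1, this])]
    · have hszeq : (⟨ts⟩ : PySem.Dict String Int).getD k 0 = pvSz ts k := rfl
      rw [show (rest.countP (fun t => decide (f t < pvSz ts t)) +
          if (decide (f k < pvSz ts k)) = true then 1 else 0) =
          rest.countP (fun t => decide (f t < pvSz ts t)) + 0 by simp [he]] at hc
      obtain ⟨f', heq, hout, hmap⟩ := ih f rem prog
        (fun t ht => hsub t (by simp [ht])) (by simp at hnd; exact hnd.2) hr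
        (by push_cast at hc ⊢; omega)
      refine ⟨f', ?_, ?_, ?_⟩
      · simp only [aPass, getD_pvMap ts f k hkmem, hszeq, if_neg he]
        exact heq
      · intro x hx
        exact hout x (fun h => hx (by simp [h]))
      · rw [pvDistF, if_neg (by simp [he]), List.map_cons, hmap,
          hout k hknotin]

-- arithmetic facts about pvS / pvE
lemma pvS_succ (cs : List Int) (L : Int) : pvS cs (L + 1) = pvS cs L + pvE cs L := by
  induction cs with
  | nil => simp [pvS, pvE]
  | cons c rest ih =>
    simp only [pvS, pvE, List.map_cons, List.sum_cons, List.countP_cons] at *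
    by_cases h : L < c
    · simp [h]; push_cast; omega
    · simp [h]; push_cast at ih ⊢; omega

lemma pvS_mono (cs : List Int) (L L' : Int) (h : L ≤ L') : pvS cs L ≤ pvS cs L' := by
  induction cs with
  | nil => simp [pvS]
  | cons c rest ih =>
    simp only [pvS, List.map_cons, List.sum_cons] at *
    have : min c L ≤ min c L' := by omega
    omega

lemma pvE_nonneg (cs : List Int) (L : Int) : 0 ≤ pvE cs L := by
  unfold pvE; exact Int.natCast_nonneg _

lemma pvS_eq_sum_of_E_zero (cs : List Int) (L : Int) (h : pvE cs L = 0) :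
    pvS cs L = cs.sum := by
  have h0 : cs.countP (fun c => decide (L < c)) = 0 := by
    simp only [pvE] at h; exact_mod_cast h
  have hall := List.countP_eq_zero.mp h0
  unfold pvS
  rw [List.map_congr_left (g := fun c => c) (fun c hc => by
    have := hall c hc
    simp at this
    show min c L = c
    omega)]
  simp

lemma pvE_le_gap (cs : List Int) (L : Int) : pvE cs L ≤ cs.sum - pvS cs L := by
  induction cs with
  | nil => simp [pvS, pvE]
  | cons c rest ih =>
    simp only [pvS, pvE, List.map_cons, List.sum_cons, List.countP_cons] at *
    by_cases h : L < c
    · simp [h]; push_cast; omega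
    · simp [h]; push_cast at ih ⊢; omega

-- uniqueness of the (level, remainder) pair that the final distribution depends on
lemma good_unique (cs : List Int) (L rem L' rem' : Int)
    (h : pvGood cs L rem) (h' : pvGood cs L' rem')
    (hS : pvS cs L + rem = pvS cs L' + rem') :
    (L = L' ∧ rem = rem') ∨ (rem = 0 ∧ rem' = 0 ∧ ∀ c ∈ cs, min c L = min c L') := by
  unfold pvGood at h h'
  obtain ⟨hL, hrem, hcase⟩ := h
  obtain ⟨hL', hrem', hcase'⟩ := h'
  rcases hcase with hlt | ⟨h0, hE0⟩
  · rcases hcase' with hlt' | ⟨h0', hE0'⟩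
    · rcases lt_trichotomy L L' with ho | ho | ho
      · exfalso
        have h1 : pvS cs (L + 1) ≤ pvS cs L' := pvS_mono cs (L + 1) L' (by omega)
        have h2 := pvS_succ cs L
        omega
      · left; constructor; · exact ho
        rw [ho] at hS; omega
      · exfalso
        have h1 : pvS cs (L' + 1) ≤ pvS cs L := pvS_mono cs (L' + 1) L (by omega)
        have h2 := pvS_succ cs L'
        omega
    · exfalso
      have h1 := pvS_eq_sum_of_E_zero cs L' hE0'
      have h2 := pvE_le_gap cs L
      omega
  · rcases hcase' with hlt' | ⟨h0', hE0'⟩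
    · exfalso
      have h1 := pvS_eq_sum_of_E_zero cs L hE0
      have h2 := pvE_le_gap cs L'
      omega
    · right
      refine ⟨h0, h0', ?_⟩
      intro c hc
      have hc1 : ¬ L < c := by
        have : cs.countP (fun c => decide (L < c)) = 0 := by
          simp only [pvE] at hE0; exact_mod_cast hE0
        have := List.countP_eq_zero.mp this c hc; simpa using this
      have hc2 : ¬ L' < c := by
        have : cs.countP (fun c => decide (L' < c)) = 0 := by
          simp only [pvE] at hE0'; exact_mod_cast hE0'
        have := List.countP_eq_zero.mp this c hc; simpa using this
      omega

-- transfer of the eligibility count from key lists to capacity lists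
lemma countP_minprof (ts : List (String × Int)) (hnd : (ts.map Prod.fst).Nodup) (L : Int)
    (hL : 0 ≤ L) :
    ((ts.map Prod.fst).countP (fun t => decide (pvMinprof ts L t < pvSz ts t)) : Int) =
      pvE (pvCs ts) L := by
  unfold pvE pvCs
  rw [List.countP_map, List.countP_map]
  congr 1
  apply countP_congr_fun
  intro p hp
  have hsz := sz_eq ts hnd p hp
  simp only [Function.comp, pvMinprof, hsz]
  by_cases h : L < max p.2 0
  · simp [h]; omega
  · simp [h]; omega

-- the partial-pass output as a distribution over (key, capacity) pairs
lemma pvDistF_eq_pvDistC (sz : String → Int) (L : Int) (hL : 0 ≤ L) :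
    ∀ (l : List (String × Int)) (rem : Int), (∀ p ∈ l, sz p.1 = p.2) →
      pvDistF sz (fun k => min (max (sz k) 0) L) (l.map Prod.fst) rem =
        pvDistC L (l.map (fun p => (p.1, max p.2 0))) rem := by
  intro l
  induction l with
  | nil => intro rem _; rfl
  | cons p rest ih =>
    intro rem h
    have hp := h p (by simp)
    simp only [List.map_cons]
    rw [pvDistF, pvDistC, hp]
    have hiff : (min (max p.2 0) L < p.2) ↔ (L < max p.2 0) := by omega
    by_cases hcond : 0 < rem ∧ L < max p.2 0
    · rw [if_pos ⟨hcond.1, hiff.mpr hcond.2⟩, if_pos hcond,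
        ih (rem - 1) (fun q hq => h q (by simp [hq]))]
    · rw [if_neg (fun hh => hcond ⟨hh.1, hiff.mp hh.2⟩), if_neg hcond,
        ih rem (fun q hq => h q (by simp [hq]))]

lemma pvDistC_zero_congr (L L' : Int) :
    ∀ (l : List (String × Int)), (∀ p ∈ l, min p.2 L = min p.2 L') →
      pvDistC L l 0 = pvDistC L' l 0 := by
  intro l
  induction l with
  | nil => intro _; rfl
  | cons p rest ih =>
    intro h
    rw [pvDistC, pvDistC, if_neg (by omega), if_neg (by omega),
      h p (by simp), ih (fun q hq => h q (by simp [hq]))]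

lemma pvMap_minprof_eq_distC (ts : List (String × Int)) (hnd : (ts.map Prod.fst).Nodup)
    (L : Int) (hL : 0 ≤ L) :
    pvMap ts (pvMinprof ts L) = pvDistC L (pvCaps ts) 0 := by
  have h1 : pvMap ts (pvMinprof ts L) = (ts.map Prod.fst).map
      (fun t => (t, (fun k => min (max (pvSz ts k) 0) L) t)) := by
    simp [pvMap, pvMinprof, List.map_map, Function.comp]
  rw [h1, ← pvDistF_nonpos (pvSz ts) _ _ 0 le_rfl,
    pvDistF_eq_pvDistC (pvSz ts) L hL ts 0 (sz_eq ts hnd)]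
  rfl

-- the main characterisation of A's while-loop
lemma aLoop_spec (ts : List (String × Int)) (hnd : (ts.map Prod.fst).Nodup)
    (Lstar rstar : Int) (hgood : pvGood (pvCs ts) Lstar rstar) :
    ∀ (n : Nat) (rem L : Int), rem.toNat = n → 0 ≤ L → 0 ≤ rem →
      rem ≤ (pvCs ts).sum - pvS (pvCs ts) L →
      pvS (pvCs ts) L + rem = pvS (pvCs ts) Lstar + rstar →
      (aLoop ⟨ts⟩ (ts.map Prod.fst) ⟨pvMap ts (pvMinprof ts L)⟩ rem).items =
        pvDistC Lstar (pvCaps ts) rstar := by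
  intro n
  induction n using Nat.strong_induction_on with
  | _ n ihn =>
    intro rem L hn hL hrem hgap hlink
    by_cases hpos : 0 < rem
    · have hcnt := countP_minprof ts hnd L hL
      by_cases hpart : rem < pvE (pvCs ts) L
      · -- partial pass: the loop ends inside this pass
        obtain ⟨f', heq, _, hmap⟩ := aPass_partial ts (ts.map Prod.fst) (pvMinprof ts L)
          rem false (fun k hk => hk) hnd hpos (by rw [hcnt]; exact hpart)
        rw [aLoop, dif_pos hpos]
        simp only [heq]
        rw [dif_pos trivial, aLoop, dif_neg (by omega)]
        have hitems : (⟨pvMap ts f'⟩ : PySem.Dict String Int).items =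
            pvDistC L (pvCaps ts) rem := by
          show pvMap ts f' = _
          have : pvMap ts f' = (ts.map Prod.fst).map (fun t => (t, f' t)) := by
            simp [pvMap, List.map_map, Function.comp]
          rw [this, hmap,
            pvDistF_congr (pvSz ts) (pvMinprof ts L) (fun k => min (max (pvSz ts k) 0) L)
              _ _ (fun t _ => rfl),
            pvDistF_eq_pvDistC (pvSz ts) L hL ts rem (sz_eq ts hnd)]
          rfl
        rw [hitems]
        have hgoodL : pvGood (pvCs ts) L rem := by
          unfold pvGood
          exact ⟨hL, hrem, Or.inl hpart⟩
        rcases good_unique (pvCs ts) L rem Lstar rstar hgoodL hgood hlink with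
          ⟨hLe, hre⟩ | ⟨h0, _, _⟩
        · rw [hLe, hre]
        · omega
      · -- full pass: every eligible task gets one sample, the level rises by one
        push_neg at hpart
        have hE1 : 1 ≤ pvE (pvCs ts) L := by
          by_contra hE
          have hE0 : pvE (pvCs ts) L = 0 := le_antisymm (by omega) (pvE_nonneg _ _)
          have := pvS_eq_sum_of_E_zero (pvCs ts) L hE0
          omega
        have hfull := aPass_full ts (ts.map Prod.fst) (pvMinprof ts L) rem false
          (fun k hk => hk) hnd hpos (by rw [hcnt]; exact hpart)
        rw [aLoop, dif_pos hpos]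
        simp only [hfull]
        rw [dif_pos (show (false || decide ((0:Int) <
            ((ts.map Prod.fst).countP (fun t => decide (pvMinprof ts L t < pvSz ts t)) : Int)))
            = true by
          simp only [Bool.false_or, decide_eq_true_eq]
          rw [hcnt]
          omega)]
        have hbump : pvMap ts (pvBump (pvSz ts) (pvMinprof ts L) (ts.map Prod.fst)) =
            pvMap ts (pvMinprof ts (L + 1)) := by
          apply pvMap_congr
          intro p hp
          have hmem : p.1 ∈ ts.map Prod.fst := List.mem_map_of_mem hp
          have hsz := sz_eq ts hnd p hp
          show (if p.1 ∈ ts.map Prod.fst ∧ pvMinprof ts L p.1 < pvSz ts p.1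
              then pvMinprof ts L p.1 + 1 else pvMinprof ts L p.1) = pvMinprof ts (L + 1) p.1
          by_cases he : pvMinprof ts L p.1 < pvSz ts p.1
          · rw [if_pos ⟨hmem, he⟩]
            simp only [pvMinprof, hsz] at he ⊢
            omega
          · rw [if_neg (fun hh => he hh.2)]
            simp only [pvMinprof, hsz] at he ⊢
            omega
        rw [hcnt, hbump]
        have hSsucc := pvS_succ (pvCs ts) L
        exact ihn (rem - pvE (pvCs ts) L).toNat (by omega)
          (rem - pvE (pvCs ts) L) (L + 1) rfl (by omega) (by omega)
          (by omega) (by omega)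
    · -- remaining ≤ 0: the loop never runs
      have hrem0 : rem = 0 := by omega
      rw [aLoop, dif_neg hpos]
      have hgoodL : pvGood (pvCs ts) L 0 := by
        unfold pvGood
        refine ⟨hL, le_rfl, ?_⟩
        by_cases hE : pvE (pvCs ts) L = 0
        · exact Or.inr ⟨rfl, hE⟩
        · exact Or.inl (lt_of_le_of_ne (pvE_nonneg _ _) (Ne.symm hE))
      rw [hrem0] at hlink
      rcases good_unique (pvCs ts) L 0 Lstar rstar hgoodL hgood hlink with
        ⟨hLe, hre⟩ | ⟨_, hr0, hmin⟩
      · show pvMap ts (pvMinprof ts L) = _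
        rw [hLe, ← hre, pvMap_minprof_eq_distC ts hnd Lstar (hLe ▸ hL)]
      · show pvMap ts (pvMinprof ts L) = _
        rw [hr0, pvMap_minprof_eq_distC ts hnd L hL]
        apply pvDistC_zero_congr
        intro p hp
        apply hmin
        unfold pvCaps at hp
        rcases List.mem_map.mp hp with ⟨q, hq, hqe⟩
        unfold pvCs
        exact List.mem_map.mpr ⟨q, hq, by rw [← hqe]⟩

-- sums of clamped lists
lemma sum_min_of_le (l : List Int) (a : Int) (h : ∀ x ∈ l, x ≤ a) :
    (l.map (fun x => min x a)).sum = l.sum := by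
  rw [List.map_congr_left (g := fun x => x) (fun x hx => by
    have := h x hx
    show min x a = x
    omega)]
  simp

lemma sum_min_of_ge (l : List Int) (a : Int) (h : ∀ x ∈ l, a ≤ x) :
    (l.map (fun x => min x a)).sum = a * l.length := by
  induction l with
  | nil => simp
  | cons x rest ih =>
    have hx := h x (by simp)
    simp only [List.map_cons, List.sum_cons, List.length_cons]
    rw [ih (fun y hy => h y (by simp [hy]))]
    have : min x a = a := by omega
    rw [this]; push_cast; ring

lemma sum_gap_of_ge (l : List Int) (a : Int) (h : ∀ x ∈ l, a ≤ x) :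
    (l.map (fun x => x - min x a)).sum = l.sum - a * l.length := by
  induction l with
  | nil => simp
  | cons x rest ih =>
    have hx := h x (by simp)
    simp only [List.map_cons, List.sum_cons, List.length_cons]
    rw [ih (fun y hy => h y (by simp [hy]))]
    have : min x a = a := by omega
    rw [this]; push_cast; ring

lemma pvS_append (l1 l2 : List Int) (L : Int) :
    pvS (l1 ++ l2) L = pvS l1 L + pvS l2 L := by
  simp [pvS]

lemma pvE_append (l1 l2 : List Int) (L : Int) :
    pvE (l1 ++ l2) L = pvE l1 L + pvE l2 L := by
  simp [pvE, List.countP_append]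

-- the water-filling loop of B establishes exactly the pvGood invariant
lemma bFill_good (scs : List Int) :
    ∀ (suf pre : List Int) (level rem : Int),
      scs = pre ++ suf → (∀ c ∈ pre, c ≤ level) → (∀ c ∈ suf, level ≤ c) →
      suf.Pairwise (· ≤ ·) → 0 ≤ level → 0 ≤ rem →
      rem ≤ (suf.map (fun c => c - min c level)).sum →
      0 ≤ (bFill (scs.length : Int) (PySem.List.enumerate suf (pre.length : Int)) level rem).1 ∧
      0 ≤ (bFill (scs.length : Int) (PySem.List.enumerate suf (pre.length : Int)) level rem).2 ∧
      pvS scs (bFill (scs.length : Int) (PySem.List.enumerate suf (pre.length : Int)) level rem).1 +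
        (bFill (scs.length : Int) (PySem.List.enumerate suf (pre.length : Int)) level rem).2 =
        pvS scs level + rem ∧
      ((bFill (scs.length : Int) (PySem.List.enumerate suf (pre.length : Int)) level rem).2 <
        pvE scs (bFill (scs.length : Int) (PySem.List.enumerate suf (pre.length : Int)) level rem).1 ∨
       ((bFill (scs.length : Int) (PySem.List.enumerate suf (pre.length : Int)) level rem).2 = 0 ∧
        pvE scs (bFill (scs.length : Int) (PySem.List.enumerate suf (pre.length : Int)) level rem).1 = 0)) := by
  intro suf
  induction suf with
  | nil =>
    intro pre level rem hsplit hpre _ _ hlev hrem hbound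
    have henil : PySem.List.enumerate ([] : List Int) (pre.length : Int) = [] := rfl
    have hbf : bFill (scs.length : Int) [] level rem = (level, rem) := rfl
    rw [henil, hbf]
    have hbound0 : rem ≤ 0 := by simpa using hbound
    have hE0 : pvE scs level = 0 := by
      have h0 : scs.countP (fun c => decide (level < c)) = 0 := by
        apply List.countP_eq_zero.mpr
        intro c hc
        have hcpre : c ∈ pre := by rw [hsplit] at hc; simpa using hc
        have := hpre c hcpre
        simpa using (by omega : ¬ level < c)
      simp [pvE, h0]
    exact ⟨hlev, (by omega : (0:Int) ≤ rem), rfl, Or.inr ⟨(by omega : rem = 0), hE0⟩⟩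
  | cons c rest ih =>
    intro pre level rem hsplit hpre hsuf hpw hlev hrem hbound
    have hlc : level ≤ c := hsuf c (by simp)
    have hrestc : ∀ x ∈ rest, c ≤ x := fun x hx => (List.pairwise_cons.mp hpw).1 x hx
    have hrestlev : ∀ x ∈ rest, level ≤ x := fun x hx => le_trans hlc (hrestc x hx)
    have hP : (scs.length : Int) - (pre.length : Int) = (rest.length : Int) + 1 := by
      rw [hsplit]
      push_cast [List.length_append, List.length_cons]
      ring
    have hstep : bFill (scs.length : Int)
        (PySem.List.enumerate (c :: rest) (pre.length : Int)) level rem =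
        (if (c - level) * ((scs.length : Int) - (pre.length : Int)) ≤ rem then
          bFill (scs.length : Int) (PySem.List.enumerate rest ((pre.length : Int) + 1)) c
            (rem - (c - level) * ((scs.length : Int) - (pre.length : Int)))
        else
          (level + PySem.Int.floordiv rem ((scs.length : Int) - (pre.length : Int)),
           rem - PySem.Int.floordiv rem ((scs.length : Int) - (pre.length : Int)) *
             ((scs.length : Int) - (pre.length : Int)))) := rfl
    rw [hstep, hP]
    -- pvS of scs splits through pre and the suffix
    have hSsplit : ∀ X : Int, pvS scs X = pvS pre X + pvS (c :: rest) X := by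
      intro X; rw [hsplit, pvS_append]
    have hEsplit : ∀ X : Int, pvE scs X = pvE pre X + pvE (c :: rest) X := by
      intro X; rw [hsplit, pvE_append]
    have hpreS : ∀ X : Int, level ≤ X → pvS pre X = pre.sum := by
      intro X hX
      unfold pvS
      exact sum_min_of_le pre X (fun x hx => le_trans (hpre x hx) hX)
    have hsumsuf : ∀ X : Int, X ≤ c → pvS (c :: rest) X = X * ((rest.length : Int) + 1) := by
      intro X hXc
      unfold pvS
      rw [sum_min_of_ge (c :: rest) X (by
        intro x hx
        rcases List.mem_cons.mp hx with h | h
        · omega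
        · have := hrestc x h; omega)]
      push_cast [List.length_cons]
      ring
    by_cases hbr : (c - level) * ((rest.length : Int) + 1) ≤ rem
    · -- full step: the level rises to c
      rw [if_pos hbr]
      have hx2 : (c - level) * ((rest.length : Int) + 1) =
          c * (rest.length : Int) - level * (rest.length : Int) + c - level := by ring
      have hnewbound : rem - (c - level) * ((rest.length : Int) + 1) ≤
          (rest.map (fun x => x - min x c)).sum := by
        have e1 := sum_gap_of_ge (c :: rest) level (fun x hx => by
          rcases List.mem_cons.mp hx with h | h
          · omega
          · exact hrestlev x h)
        have e2 := sum_gap_of_ge rest c hrestc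
        rw [e1] at hbound
        rw [e2]
        have hsumc : (c :: rest).sum = c + rest.sum := by simp
        have hlencast : ((c :: rest).length : Int) = (rest.length : Int) + 1 := by
          push_cast [List.length_cons]; ring
        rw [hsumc, hlencast] at hbound
        have hx1 : level * ((rest.length : Int) + 1) =
            level * (rest.length : Int) + level := by ring
        omega
      have hrec := ih (pre ++ [c]) c (rem - (c - level) * ((rest.length : Int) + 1))
        (by rw [hsplit]; simp)
        (by intro x hx
            rcases List.mem_append.mp hx with h | h
            · exact le_trans (hpre x h) hlc
            · simp at h; omega)
        hrestc (List.pairwise_cons.mp hpw).2 (by omega) (by omega) hnewbound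
      have hlen2 : (((pre ++ [c]).length : Nat) : Int) = (pre.length : Int) + 1 := by
        push_cast [List.length_append, List.length_cons]
        simp
      rw [hlen2] at hrec
      obtain ⟨g1, g2, g3, g4⟩ := hrec
      refine ⟨g1, g2, ?_, g4⟩
      rw [g3]
      have hSc : pvS scs c = pvS scs level + (c - level) * ((rest.length : Int) + 1) := by
        rw [hSsplit c, hSsplit level, hpreS c hlc, hpreS level le_rfl,
          hsumsuf c le_rfl, hsumsuf level hlc]
        have hx1 : level * ((rest.length : Int) + 1) + (c - level) * ((rest.length : Int) + 1)
            = c * ((rest.length : Int) + 1) := by ring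
        omega
      omega
    · -- final partial step
      rw [if_neg hbr]
      push_neg at hbr
      have hpoolspos : (0 : Int) < (rest.length : Int) + 1 := by positivity
      set extra := PySem.Int.floordiv rem ((rest.length : Int) + 1) with hextra
      have hfd1 : 0 ≤ extra := by
        rw [hextra]
        have := (PySem.Int.le_floordiv_iff_mul_le (a := rem)
          (b := (rest.length : Int) + 1) (q := 0) hpoolspos).mpr (by omega)
        omega
      have hfd2 : extra * ((rest.length : Int) + 1) ≤ rem := by
        have := (PySem.Int.le_floordiv_iff_mul_le (a := rem)
          (b := (rest.length : Int) + 1) (q := extra) hpoolspos).mp (le_refl _)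
        omega
      have hfd3 : rem < (extra + 1) * ((rest.length : Int) + 1) := by
        have := (PySem.Int.floordiv_lt_iff_lt_mul (a := rem)
          (b := (rest.length : Int) + 1) (q := extra + 1) hpoolspos).mp (by omega)
        omega
      have hfd4 : extra < c - level := by
        have := (PySem.Int.floordiv_lt_iff_lt_mul (a := rem)
          (b := (rest.length : Int) + 1) (q := c - level) hpoolspos).mpr hbr
        omega
      have hxe : (extra + 1) * ((rest.length : Int) + 1) =
          extra * ((rest.length : Int) + 1) + ((rest.length : Int) + 1) := by ring
      have hSe : pvS scs (level + extra) =
          pvS scs level + extra * ((rest.length : Int) + 1) := by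
        rw [hSsplit (level + extra), hSsplit level, hpreS (level + extra) (by omega),
          hpreS level le_rfl, hsumsuf (level + extra) (by omega), hsumsuf level hlc]
        have hx1 : level * ((rest.length : Int) + 1) + extra * ((rest.length : Int) + 1)
            = (level + extra) * ((rest.length : Int) + 1) := by ring
        omega
      have hEe : pvE scs (level + extra) = (rest.length : Int) + 1 := by
        rw [hEsplit (level + extra)]
        have hpre0 : pvE pre (level + extra) = 0 := by
          have h0 : pre.countP (fun x => decide (level + extra < x)) = 0 := by
            apply List.countP_eq_zero.mpr
            intro x hx
            have := hpre x hx
            simpa using (by omega : ¬ level + extra < x)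
          simp [pvE, h0]
        have hsuf0 : pvE (c :: rest) (level + extra) = (rest.length : Int) + 1 := by
          have h1 : (c :: rest).countP (fun x => decide (level + extra < x)) =
              (c :: rest).length := by
            apply List.countP_eq_length.mpr
            intro x hx
            rcases List.mem_cons.mp hx with h | h
            · simpa using (by omega : level + extra < x)
            · have := hrestc x h
              simpa using (by omega : level + extra < x)
          rw [pvE, h1]
          push_cast [List.length_cons]
          ring
        rw [hpre0, hsuf0]
        ring
      refine ⟨by omega, by omega, ?_, Or.inl ?_⟩
      · show pvS scs (level + extra) + (rem - extra * ((rest.length : Int) + 1)) =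
          pvS scs level + rem
        omega
      · show rem - extra * ((rest.length : Int) + 1) < pvE scs (level + extra)
        rw [hEe]
        omega

-- the remainder pass of B produces pvDistC
lemma bAlloc_items :
    ∀ (l : List (String × Int)) (d : PySem.Dict String Int) (L rem : Int),
      (l.map Prod.fst).Nodup → (∀ p ∈ l, d.contains p.1 = false) →
      (bAlloc l L rem d).items = d.items ++ pvDistC L l rem := by
  intro l
  induction l with
  | nil => intro d L rem _ _; simp [bAlloc, pvDistC]
  | cons p rest ih =>
    intro d L rem hnd hfresh
    obtain ⟨t, c⟩ := p
    have hfresh0 : d.contains t = false := hfresh (t, c) (by simp)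
    have hnd' : (rest.map Prod.fst).Nodup := by simp at hnd; exact hnd.2
    have htnotin : t ∉ rest.map Prod.fst := by simp at hnd; simpa using hnd.1
    have hfresh' : ∀ v : Int, ∀ q ∈ rest, (d.insert t v).contains q.1 = false := by
      intro v q hq
      rw [PySem.Dict.contains_insert]
      have h1 : (q.1 == t) = false := by
        have : q.1 ≠ t := fun h => htnotin (h ▸ List.mem_map_of_mem hq)
        simpa using this
      rw [h1, hfresh q (by simp [hq])]
      rfl
    by_cases hcond : 0 < rem ∧ L < c
    · rw [show bAlloc ((t, c) :: rest) L rem d =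
        bAlloc rest L (rem - 1) (d.insert t (min c L + 1)) by
          simp [bAlloc, hcond]]
      rw [ih (d.insert t (min c L + 1)) L (rem - 1) hnd' (hfresh' _),
        PySem.Dict.items_insert_of_not_contains _ _ hfresh0]
      rw [pvDistC, if_pos hcond, List.append_assoc]
      rfl
    · rw [show bAlloc ((t, c) :: rest) L rem d =
        bAlloc rest L rem (d.insert t (min c L)) by
          simp only [bAlloc]; rw [if_neg hcond]]
      rw [ih (d.insert t (min c L)) L rem hnd' (hfresh' _),
        PySem.Dict.items_insert_of_not_contains _ _ hfresh0]
      rw [pvDistC, if_neg hcond, List.append_assoc]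
      rfl

lemma caps_items (ts : List (String × Int)) (hnd : (ts.map Prod.fst).Nodup) :
    ((⟨ts⟩ : PySem.Dict String Int).items.foldl
        (fun d p => d.insert p.1 (max p.2 0)) PySem.Dict.empty).items = pvCaps ts := by
  have := PySem.Dict.items_foldl_insert_fresh (l := ts) (k := Prod.fst)
    (v := fun p => max p.2 0) (d := PySem.Dict.empty)
    (by intro a _; exact PySem.Dict.contains_empty a.1) hnd
  simpa [pvCaps] using this

lemma zeros_items (ts : List (String × Int)) (hnd : (ts.map Prod.fst).Nodup) :
    ((⟨ts⟩ : PySem.Dict String Int).keys.foldl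
        (fun d t => d.insert t (0 : Int)) PySem.Dict.empty).items = pvMap ts (fun _ => 0) := by
  have hkeys : (⟨ts⟩ : PySem.Dict String Int).keys = ts.map Prod.fst := rfl
  rw [hkeys]
  have := PySem.Dict.items_foldl_insert_fresh (l := ts.map Prod.fst) (k := fun t => t)
    (v := fun _ => (0 : Int)) (d := PySem.Dict.empty)
    (by intro a _; exact PySem.Dict.contains_empty a) (by simpa using hnd)
  simpa [pvMap, List.map_map, Function.comp] using this

lemma cs_nonneg (ts : List (String × Int)) : ∀ c ∈ pvCs ts, 0 ≤ c := by
  intro c hc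
  rcases List.mem_map.mp hc with ⟨p, _, hpe⟩
  omega

-- ===== VERDICT (by name: the statement is the Claim_ definition above) =====
theorem allocate_counts_across_tasks_py_spec : Claim_equal_allocate_counts_across_tasks_py := by
  intro ts T _ hpre
  obtain ⟨hnd, hle⟩ := hpre
  unfold Spec_allocate_counts_across_tasks_py
  unfold allocate_counts_across_tasks_py allocate_counts_across_tasks_py_alt
  simp only []
  have havail : ¬ ((⟨ts⟩ : PySem.Dict String Int).values.sum < T) := by
    have : (⟨ts⟩ : PySem.Dict String Int).values = ts.map Prod.snd := rfl
    rw [this]; omega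
  rw [if_neg havail, if_neg havail]
  by_cases hT : T ≤ 0
  · -- the while loop never runs; both sides return the all-zeros dict
    rw [if_pos hT]
    rw [aLoop, dif_neg (by omega)]
  · rw [if_neg hT]
    push_neg at hT
    -- set up the capacity lists
    have hcapsitems := caps_items ts hnd
    have hvalues : ((⟨ts⟩ : PySem.Dict String Int).items.foldl
        (fun d p => d.insert p.1 (max p.2 0)) PySem.Dict.empty).values = pvCs ts := by
      show (((⟨ts⟩ : PySem.Dict String Int).items.foldl
        (fun d p => d.insert p.1 (max p.2 0)) PySem.Dict.empty).items.map Prod.snd) = _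
      rw [hcapsitems]
      simp [pvCaps, pvCs, List.map_map, Function.comp]
    set scs := PySem.List.sorted ((⟨ts⟩ : PySem.Dict String Int).items.foldl
        (fun d p => d.insert p.1 (max p.2 0)) PySem.Dict.empty).values (fun x => x) with hscs
    have hperm : scs.Perm (pvCs ts) := by
      rw [hscs, hvalues]; exact PySem.List.sorted_perm _ _ _
    have hpw : scs.Pairwise (· ≤ ·) := by
      have := PySem.List.sorted_pairwise ((⟨ts⟩ : PySem.Dict String Int).items.foldl
        (fun d p => d.insert p.1 (max p.2 0)) PySem.Dict.empty).values (fun x => x)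
      simpa [hscs] using this
    have hscsnn : ∀ c ∈ scs, 0 ≤ c := fun c hc => cs_nonneg ts c (hperm.mem_iff.mp hc)
    have hSperm : ∀ X : Int, pvS scs X = pvS (pvCs ts) X := by
      intro X; exact (hperm.map (fun c => min c X)).sum_eq
    have hEperm : ∀ X : Int, pvE scs X = pvE (pvCs ts) X := by
      intro X; unfold pvE; rw [hperm.countP_eq]
    have hsum : scs.sum = (pvCs ts).sum := hperm.sum_eq
    have hcssum : (ts.map Prod.snd).sum ≤ (pvCs ts).sum := by
      apply List.sum_le_sum
      intro p _; omega
    -- run the water-filling loop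
    have hfill := bFill_good scs scs [] 0 T rfl (by simp) (fun c hc => hscsnn c hc) hpw
      le_rfl (by omega)
      (by
        have h1 : (List.map (fun c => c - min c 0) scs).sum = scs.sum := by
          rw [List.map_congr_left (g := fun c => c) (fun c hc => by
            have := hscsnn c hc
            show c - min c 0 = c
            omega)]
          simp
        rw [h1, hsum]
        omega)
    simp only [List.length_nil, Nat.cast_zero] at hfill
    set lr := bFill (scs.length : Int) (PySem.List.enumerate scs 0) 0 T with hlr
    obtain ⟨g1, g2, g3, g4⟩ := hfill
    have hS0 : pvS scs 0 = 0 := by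
      unfold pvS
      rw [sum_min_of_ge scs 0 hscsnn]; ring
    have hgood : pvGood (pvCs ts) lr.1 lr.2 := by
      unfold pvGood
      refine ⟨g1, g2, ?_⟩
      rcases g4 with h | h
      · left; rw [← hEperm]; exact h
      · right; rw [← hEperm]; exact h
    -- B's result
    have hB : (bAlloc ((⟨ts⟩ : PySem.Dict String Int).items.foldl
          (fun d p => d.insert p.1 (max p.2 0)) PySem.Dict.empty).items lr.1 lr.2
          PySem.Dict.empty).items = pvDistC lr.1 (pvCaps ts) lr.2 := by
      rw [hcapsitems]
      rw [bAlloc_items (pvCaps ts) PySem.Dict.empty lr.1 lr.2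
        (by simpa [pvCaps, List.map_map, Function.comp] using hnd)
        (fun p _ => PySem.Dict.contains_empty p.1)]
      rfl
    -- A's result via the loop characterisation
    have hzero : ((ts.map Prod.fst).foldl
        (fun d t => d.insert t (0 : Int)) PySem.Dict.empty) =
        (⟨pvMap ts (pvMinprof ts 0)⟩ : PySem.Dict String Int) := by
      apply PySem.Dict.ext
      have h0 := zeros_items ts hnd
      have hcongr : pvMap ts (fun _ => 0) = pvMap ts (pvMinprof ts 0) := by
        apply pvMap_congr
        intro p _
        simp only [pvMinprof]
        omega
      exact h0.trans hcongr
    have hA := aLoop_spec ts hnd lr.1 lr.2 hgood T.toNat T 0 rfl le_rfl (by omega)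
      (by rw [← hSperm 0, hS0, ← hsum]; omega)
      (by rw [← hSperm lr.1, ← hSperm 0, hS0]; omega)
    have hAll : (aLoop ⟨ts⟩ (ts.map Prod.fst)
        ((ts.map Prod.fst).foldl (fun d t => d.insert t (0 : Int)) PySem.Dict.empty) T).items =
        pvDistC lr.1 (pvCaps ts) lr.2 := by
      rw [hzero]
      exact hA
    exact hAll.trans hB.symm
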